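-- pv_equiv track=rewrite | github.com/MettaTan/digital-product-wizard | app.py | add_module_prefix_to_headings
-- ===== SOURCE A (Python) =====
-- def add_module_prefix_to_headings(text):
--     lines = text.splitlines()
--     count = 1
--     updated = []
--     for line in lines:
--         if line.strip().startswith("## "):
--             updated.append(f"## Module {count}: {line.strip()[3:].strip()}")
--             count += 1
--         else:
--             updated.append(line)
--     return "\n".join(updated)
-- ===== SOURCE B (Python) =====
-- def add_module_prefix_to_headings(text):
--     def go(lines, count):
--         if not lines:
--             return []
--         first, rest = lines[0], lines[1:]
--         s = first.strip()
--         if s.startswith("## "):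
--             return [f"## Module {count}: {s[3:].strip()}"] + go(rest, count + 1)
--         return [first] + go(rest, count)
--     return "\n".join(go(text.splitlines(), 1))
-- ===== Notes on version B (the rewrite author's own statement) =====
-- stated objective: alternative
-- what changed: The imperative loop that appends into an accumulator list while mutating a counter is replaced by a structural recursion over the line list that threads the counter and builds the output front-to-back by cons, stripping each line once.
import Mathlib
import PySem

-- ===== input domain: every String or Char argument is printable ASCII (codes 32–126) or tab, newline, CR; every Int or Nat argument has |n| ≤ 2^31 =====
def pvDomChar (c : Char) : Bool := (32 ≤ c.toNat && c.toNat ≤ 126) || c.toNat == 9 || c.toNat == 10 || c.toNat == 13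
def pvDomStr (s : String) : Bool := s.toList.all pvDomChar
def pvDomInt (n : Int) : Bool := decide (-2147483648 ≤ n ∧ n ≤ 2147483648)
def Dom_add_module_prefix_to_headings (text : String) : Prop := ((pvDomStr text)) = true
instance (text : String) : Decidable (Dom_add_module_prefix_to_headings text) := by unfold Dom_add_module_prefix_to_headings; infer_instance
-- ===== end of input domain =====

-- ===== PORT A =====
-- B replaces A's imperative accumulate-into-list loop by structural recursion over the
-- line list (objective: alternative decomposition; same cost).
def add_module_prefix_to_headings (text : String) : String :=
  let lines := PySem.Str.splitlines text
  let st := lines.foldl (fun (st : Int × List String) line =>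
    if PySem.Str.startswith (PySem.Str.strip line) "## " then
      (st.1 + 1, st.2 ++ ["## Module " ++ PySem.Int.toStr st.1 ++ ": " ++
        PySem.Str.strip (PySem.Str.slice (PySem.Str.strip line) (some 3) none)])
    else
      (st.1, st.2 ++ [line])) ((1 : Int), ([] : List String))
  PySem.Str.join "\n" st.2

-- ===== PORT B =====
def pvGoB (count : Int) : List String → List String
  | [] => []
  | first :: rest =>
    let s := PySem.Str.strip first
    if PySem.Str.startswith s "## " then
      ("## Module " ++ PySem.Int.toStr count ++ ": " ++
        PySem.Str.strip (PySem.Str.slice s (some 3) none)) :: pvGoB (count + 1) rest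
    else
      first :: pvGoB count rest

def add_module_prefix_to_headings_alt (text : String) : String :=
  PySem.Str.join "\n" (pvGoB 1 (PySem.Str.splitlines text))

-- ===== PRECONDITION & SPEC =====
def Spec_add_module_prefix_to_headings (text : String) (out : String) : Prop := out = add_module_prefix_to_headings_alt text
instance (text : String) (out : String) : Decidable (Spec_add_module_prefix_to_headings text out) := by unfold Spec_add_module_prefix_to_headings; infer_instance

-- ===== CLAIM (what is proved, stated in full; the proofs are below) =====
def Claim_equal_add_module_prefix_to_headings : Prop := ∀ (text : String), Dom_add_module_prefix_to_headings text → Spec_add_module_prefix_to_headings text (add_module_prefix_to_headings text)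

-- ===== LEMMAS AND PROOFS =====
theorem pvFoldl_eq_goB (lines : List String) (count : Int) (acc : List String) :
    (lines.foldl (fun (st : Int × List String) line =>
      if PySem.Str.startswith (PySem.Str.strip line) "## " then
        (st.1 + 1, st.2 ++ ["## Module " ++ PySem.Int.toStr st.1 ++ ": " ++
          PySem.Str.strip (PySem.Str.slice (PySem.Str.strip line) (some 3) none)])
      else
        (st.1, st.2 ++ [line])) (count, acc)).2 = acc ++ pvGoB count lines := by
  induction lines generalizing count acc with
  | nil => simp [pvGoB]
  | cons first rest ih =>
      simp only [List.foldl_cons, pvGoB]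
      by_cases h : PySem.Str.startswith (PySem.Str.strip first) "## " = true
      · rw [if_pos h, if_pos h, ih]
        simp
      · rw [if_neg h, if_neg h, ih]
        simp

-- ===== VERDICT (by name: the statement is the Claim_ definition above) =====
theorem add_module_prefix_to_headings_spec : Claim_equal_add_module_prefix_to_headings := by
  intro text _
  unfold Spec_add_module_prefix_to_headings add_module_prefix_to_headings add_module_prefix_to_headings_alt
  simp only [pvFoldl_eq_goB, List.nil_append]
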